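-- pv_equiv track=rewrite | github.com/nirushanayak/datastructure_and_algorithms_code | codes/bitmask_subset_sum.py | possible_players
-- ===== SOURCE A (Python) =====
-- def possible_players(scores, players):
--     sc = scores
--     scores.sort(reverse=True)
--     count = 0
--     maxsum = sum(sc[:players])
--     for m in range(pow(2,len(sc))):
--         ar = []
--         for i in range(len(sc)):
--             if m & 1<<i:
--                 ar.append(sc[i])
--         if sum(ar)==maxsum and len(ar)==players:
--             count+= 1
--     return count
-- ===== SOURCE B (Python) =====
-- # Counts size-`players` subsets achieving the maximal sum by a closed formula:
-- # sort descending, find the threshold value at the cutoff, answer = C(count of threshold, slots it fills).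
-- # Like A, sorts `scores` in place (same observable mutation).
--
-- def _choose(c, k):
--     r = 1
--     for i in range(k):
--         r = r * (c - i) // (i + 1)
--     return r
--
--
-- def possible_players(scores, players):
--     scores.sort(reverse=True)
--     n = len(scores)
--     if players <= 0 or players > n:
--         return 1 if players == 0 else 0
--     t = scores[players - 1]
--     c = scores.count(t)
--     k = scores[:players].count(t)
--     return _choose(c, k)
-- ===== Notes on version B (the rewrite author's own statement) =====
-- stated objective: faster
-- what changed: A enumerates all 2^n bitmask subsets and tests each for size and maximal sum; B sorts once, reads the threshold value at the cutoff position and returns one binomial coefficient C(occurrences of threshold, slots it fills).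
import Mathlib
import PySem

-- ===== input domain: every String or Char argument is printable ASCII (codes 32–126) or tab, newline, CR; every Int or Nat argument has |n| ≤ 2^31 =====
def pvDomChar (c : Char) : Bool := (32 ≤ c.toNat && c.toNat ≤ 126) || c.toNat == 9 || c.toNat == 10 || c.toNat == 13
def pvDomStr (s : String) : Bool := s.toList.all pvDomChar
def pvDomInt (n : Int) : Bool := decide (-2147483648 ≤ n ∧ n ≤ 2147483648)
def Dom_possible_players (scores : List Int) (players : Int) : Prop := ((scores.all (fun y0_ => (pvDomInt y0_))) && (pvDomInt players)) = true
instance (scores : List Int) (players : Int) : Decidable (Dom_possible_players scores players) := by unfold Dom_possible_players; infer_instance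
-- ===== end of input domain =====

-- B replaces A's 2^n bitmask enumeration by a closed formula (sort, threshold value, one binomial
-- coefficient); A sorts `scores` in place and B performs the same in-place sort, so the equivalence
-- proved here about return values also matches the observable mutation.

-- ===== PORT A =====
-- inner loop of A: ar = [sc[i] for i in range(len(sc)) if m & 1<<i]  (index i is always in range,
-- so Python's sc[i] is total here; ported with pyGetD and the never-used default 0)
def pvAr (m : Nat) (sc : List Int) : List Int :=
  (List.range sc.length).foldl
    (fun ar i => if m &&& (1 <<< i) != 0 then ar ++ [PySem.List.pyGetD sc (i : Int) 0] else ar) []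

def possible_players (scores : List Int) (players : Int) : Int :=
  let sc := PySem.List.sorted scores (fun y => y) true
  let maxsum := (PySem.List.slice sc none (some players)).sum
  (List.range (2 ^ sc.length)).foldl
    (fun count m =>
      let ar := pvAr m sc
      if ar.sum = maxsum ∧ (ar.length : Int) = players then count + 1 else count) 0

-- ===== PORT B =====
-- helper _choose of Source B: r = r * (c - i) // (i + 1) over i in range(k)
def pvChoose (c : Int) (k : Int) : Int :=
  (PySem.List.pyRange 0 k 1).foldl (fun r i => PySem.Int.floordiv (r * (c - i)) (i + 1)) 1

def possible_players_alt (scores : List Int) (players : Int) : Int :=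
  let s := PySem.List.sorted scores (fun y => y) true
  if players ≤ 0 ∨ (s.length : Int) < players then (if players = 0 then 1 else 0)
  else
    let t := PySem.List.pyGetD s (players - 1) 0
    let c : Int := (PySem.List.count s t : Nat)
    let k : Int := (PySem.List.count (PySem.List.slice s none (some players)) t : Nat)
    pvChoose c k

-- ===== PRECONDITION & SPEC =====
def Spec_possible_players (scores : List Int) (players : Int) (out : Int) : Prop := out = possible_players_alt scores players
instance (scores : List Int) (players : Int) (out : Int) : Decidable (Spec_possible_players scores players out) := by unfold Spec_possible_players; infer_instance

-- ===== CLAIM (what is proved, stated in full; the proofs are below) =====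
def Claim_equal_possible_players : Prop := ∀ (scores : List Int) (players : Int), Dom_possible_players scores players → Spec_possible_players scores players (possible_players scores players)

-- ===== LEMMAS AND PROOFS =====

-- the selection A's bitmask denotes, in structural form: bit 0 picks the head, the rest recurses on m/2
def pvSel : Nat → List Int → List Int
  | _, [] => []
  | m, x :: xs => (if m % 2 = 1 then [x] else []) ++ pvSel (m / 2) xs

-- count of sublists (index subsets) of s with given length k and sum t, in structural form
def pvF : List Int → Int → Int → Int
  | [], k, t => if k = 0 ∧ t = 0 then 1 else 0
  | x :: xs, k, t => pvF xs k t + pvF xs (k - 1) (t - x)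


theorem pvBit_zero (m : Nat) : (m &&& (1 <<< 0) != 0) = decide (m % 2 = 1) := by
  rw [show (1 <<< 0) = 1 from rfl, Nat.and_one_is_mod]
  rcases Nat.mod_two_eq_zero_or_one m with h | h <;> simp [h]

theorem pvBit_succ (m i : Nat) : (m &&& (1 <<< (i+1)) != 0) = ((m/2) &&& (1 <<< i) != 0) := by
  simp only [Nat.shiftLeft_eq, one_mul, Nat.and_two_pow, Nat.testBit_add_one]
  have h1 : (2:Nat) ^ (i+1) ≠ 0 := by positivity
  have h2 : (2:Nat) ^ i ≠ 0 := by positivity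
  cases (m/2).testBit i <;> (rw [Bool.eq_iff_iff]; simp [bne_iff_ne, h1, h2])

theorem pvFilterMap (sc : List Int) : ∀ m : Nat,
    ((List.range sc.length).filter (fun i => m &&& (1 <<< i) != 0)).map
      (fun i : Nat => PySem.List.pyGetD sc (i : Int) 0) = pvSel m sc := by
  induction sc with
  | nil => intro m; rfl
  | cons x xs ih =>
    intro m
    have hf : ∀ i : Nat, PySem.List.pyGetD (x :: xs) (((i+1 : Nat) : Int)) 0
        = PySem.List.pyGetD xs ((i : Nat) : Int) 0 := by
      intro i; rw [PySem.List.pyGetD_natCast, PySem.List.pyGetD_natCast, List.getD_cons_succ]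
    rw [show pvSel m (x :: xs) = (if m % 2 = 1 then [x] else []) ++ pvSel (m/2) xs from rfl,
        ← ih (m/2)]
    rw [List.length_cons, List.range_succ_eq_map, List.filter_cons]
    simp only [pvBit_zero, List.filter_map, Function.comp_def, pvBit_succ, Nat.succ_eq_add_one]
    by_cases hm : m % 2 = 1
    · simp [hm, List.map_map, Function.comp_def, hf, PySem.List.pyGetD_natCast]
    · simp [hm, List.map_map, Function.comp_def, hf]

theorem pvAr_eq_pvSel (m : Nat) (sc : List Int) : pvAr m sc = pvSel m sc := by
  rw [pvAr, PySem.List.foldl_append_if, List.nil_append, pvFilterMap]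

theorem countP_range_two_mul (N : Nat) (Q : Nat → Bool) :
    (List.range (2 * N)).countP Q
      = (List.range N).countP (fun m => Q (2 * m)) + (List.range N).countP (fun m => Q (2 * m + 1)) := by
  induction N with
  | zero => simp
  | succ n ih =>
    rw [show 2 * (n + 1) = (2 * n + 1) + 1 from by ring, List.range_succ, List.range_succ,
        List.countP_append, List.countP_append, List.range_succ, List.countP_append,
        List.countP_append, ih]
    simp [List.countP_cons]
    omega

theorem pvSel_even (m : Nat) (x : Int) (xs : List Int) : pvSel (2*m) (x::xs) = pvSel m xs := by
  rw [pvSel, if_neg (by omega), show 2*m/2 = m from by omega, List.nil_append]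

theorem pvSel_odd (m : Nat) (x : Int) (xs : List Int) : pvSel (2*m+1) (x::xs) = x :: pvSel m xs := by
  rw [pvSel, if_pos (by omega), show (2*m+1)/2 = m from by omega]
  rfl

theorem countP_sel_eq_pvF (s : List Int) (k target : Int) :
    (((List.range (2 ^ s.length)).countP
        (fun m => decide ((pvSel m s).sum = target ∧ ((pvSel m s).length : Int) = k)) : Nat) : Int)
      = pvF s k target := by
  induction s generalizing k target with
  | nil =>
    simp only [List.length_nil, pow_zero, List.range_one]
    rw [pvF]
    by_cases h1 : k = 0 <;> by_cases h2 : target = 0 <;>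
      simp [pvSel, h1, h2, eq_comm]
  | cons x xs ih =>
    rw [show (2:Nat) ^ (x::xs).length = 2 * 2 ^ xs.length from by
          rw [List.length_cons, pow_succ]; ring,
        countP_range_two_mul]
    have he : (List.range (2 ^ xs.length)).countP
        (fun m => decide ((pvSel (2*m) (x::xs)).sum = target ∧ ((pvSel (2*m) (x::xs)).length : Int) = k))
        = (List.range (2 ^ xs.length)).countP
          (fun m => decide ((pvSel m xs).sum = target ∧ ((pvSel m xs).length : Int) = k)) := by
      apply List.countP_congr
      intro m _
      rw [pvSel_even]
    have ho : (List.range (2 ^ xs.length)).countP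
        (fun m => decide ((pvSel (2*m+1) (x::xs)).sum = target ∧ ((pvSel (2*m+1) (x::xs)).length : Int) = k))
        = (List.range (2 ^ xs.length)).countP
          (fun m => decide ((pvSel m xs).sum = (target - x) ∧ ((pvSel m xs).length : Int) = k - 1)) := by
      apply List.countP_congr
      intro m _
      rw [pvSel_odd]
      simp only [decide_eq_true_eq, List.sum_cons, List.length_cons]
      push_cast
      omega
    rw [he, ho, pvF]
    push_cast
    rw [ih k target, ih (k-1) (target - x)]

theorem pvF_neg (s : List Int) : ∀ (k t : Int), k < 0 → pvF s k t = 0 := by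
  induction s with
  | nil => intro k t hk; rw [pvF, if_neg (by omega)]
  | cons x xs ih => intro k t hk; rw [pvF, ih k t hk, ih (k-1) (t-x) (by omega)]; ring

theorem pvF_zero (s : List Int) : ∀ t : Int, pvF s 0 t = if t = 0 then 1 else 0 := by
  induction s with
  | nil => intro t; rw [pvF]; by_cases h : t = 0 <;> simp [h]
  | cons x xs ih => intro t; rw [pvF, ih t, pvF_neg xs (0-1) (t-x) (by omega)]; ring

theorem pvF_gt_len (s : List Int) : ∀ (k t : Int), (s.length : Int) < k → pvF s k t = 0 := by
  induction s with
  | nil => intro k t hk; rw [pvF, if_neg (by simp at hk; omega)]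
  | cons x xs ih =>
    intro k t hk
    simp only [List.length_cons] at hk
    rw [pvF, ih k t (by push_cast at hk ⊢; omega), ih (k-1) (t-x) (by push_cast at hk ⊢; omega)]
    ring

theorem pvF_sum_bound (s : List Int) : ∀ (k T : Int), s.Pairwise (· ≥ ·) → 0 ≤ k →
    ((s.take k.toNat).sum : Int) < T → pvF s k T = 0 := by
  induction s with
  | nil =>
    intro k T _ _ hT
    simp only [List.take_nil, List.sum_nil] at hT
    rw [pvF, if_neg (by omega)]
  | cons x xs ih =>
    intro k T hp hk hT
    obtain ⟨hx, hxs⟩ := List.pairwise_cons.mp hp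
    rw [pvF]
    by_cases hk0 : k = 0
    · subst hk0
      simp only [Int.toNat_zero, List.take_zero, List.sum_nil] at hT
      rw [pvF_zero, pvF_neg xs (0-1) (T-x) (by omega), if_neg (by omega)]; ring
    · have htn : k.toNat = (k-1).toNat + 1 := by omega
      rw [htn, List.take_succ_cons, List.sum_cons] at hT
      have h2 : pvF xs (k-1) (T-x) = 0 := ih (k-1) (T-x) hxs (by omega) (by omega)
      have h1 : pvF xs k T = 0 := by
        by_cases hlen : (xs.length : Int) < k
        · exact pvF_gt_len xs k T hlen
        · apply ih k T hxs hk
          have hj : (k-1).toNat < xs.length := by omega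
          have hsum := List.sum_take_succ xs (k-1).toNat hj
          have hle : xs[(k-1).toNat] ≤ x := hx _ (List.getElem_mem hj)
          rw [htn, hsum]
          omega
      rw [h1, h2]; ring

theorem pvF_one_max (s : List Int) : ∀ v : Int, (∀ y ∈ s, y ≤ v) → pvF s 1 v = (s.count v : Int) := by
  induction s with
  | nil => intro v _; rw [pvF, if_neg (by omega)]; simp
  | cons y ys ih =>
    intro v hv
    rw [pvF, ih v (fun z hz => hv z (List.mem_cons_of_mem y hz)),
        show (1:Int) - 1 = 0 from rfl, pvF_zero, List.count_cons]
    by_cases hyv : y = v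
    · rw [if_pos (show v - y = 0 by omega), if_pos (beq_iff_eq.mpr hyv)]
      push_cast; ring
    · rw [if_neg (show ¬ v - y = 0 by omega), if_neg (by simpa using hyv)]
      push_cast; ring

theorem pvPairwise_getElem_le (xs : List Int) (hp : xs.Pairwise (· ≥ ·)) (i j : Nat)
    (hij : i ≤ j) (hj : j < xs.length) : xs[j]'hj ≤ xs[i]'(by omega) := by
  rcases Nat.eq_or_lt_of_le hij with h | h
  · subst h; exact le_refl _
  · exact List.pairwise_iff_getElem.mp hp i j (by omega) hj h

theorem pvCount_take_all (xs : List Int) (v : Int) (q : Nat) (hq : q ≤ xs.length)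
    (hall : ∀ i (h : i < q), xs[i]'(by omega) = v) : List.count v (xs.take q) = q := by
  have hlen : (xs.take q).length = q := by rw [List.length_take]; omega
  have h := (List.count_eq_length (a := v) (l := xs.take q)).mpr ?_
  · rw [h, hlen]
  · intro b hb
    obtain ⟨j, hm, he⟩ := List.mem_take_iff_getElem.mp hb
    rw [← he]
    exact (hall j (by omega)).symm

theorem pvCount_drop_zero (xs : List Int) (v : Int) (q : Nat)
    (hne : ∀ i (h1 : q ≤ i) (h2 : i < xs.length), xs[i]'h2 ≠ v) :
    List.count v (xs.drop q) = 0 := by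
  rw [List.count_eq_zero]
  intro hv
  obtain ⟨j, hj, he⟩ := List.mem_iff_getElem.mp hv
  have hlen : q + j < xs.length := by
    rw [List.length_drop] at hj; omega
  rw [List.getElem_drop] at he
  exact hne (q+j) (by omega) hlen he

theorem pvF_main (s : List Int) : ∀ p : Nat, s.Pairwise (· ≥ ·) → 1 ≤ p → p ≤ s.length →
    pvF s (p : Int) ((s.take p).sum)
      = (Nat.choose (List.count (s.getD (p-1) 0) s) (List.count (s.getD (p-1) 0) (s.take p)) : Int) := by
  induction s with
  | nil => intro p _ hp hpl; simp only [List.length_nil] at hpl; omega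
  | cons x xs ih =>
    intro p hs hp hpl
    obtain ⟨hx, hxs⟩ := List.pairwise_cons.mp hs
    by_cases hp1 : p = 1
    · subst hp1
      have htake : (x :: xs).take 1 = [x] := rfl
      have hg : (x :: xs).getD (1-1) 0 = x := rfl
      rw [htake, hg, pvF]
      rw [show ((1:Nat) : Int) = 1 from by norm_num, List.sum_cons, List.sum_nil, add_zero,
          show (1:Int) - 1 = 0 from rfl, pvF_zero, if_pos (sub_self x),
          pvF_one_max xs x (fun y hy => hx y hy)]
      simp [List.count_cons, Nat.choose_one_right]
    · obtain ⟨q, rfl⟩ : ∃ q, p = q + 2 := ⟨p - 2, by omega⟩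
      have hpl' : q + 1 ≤ xs.length := by
        simp only [List.length_cons] at hpl; omega
      have hqlt : q < xs.length := by omega
      have hgd : (x :: xs).getD (q+2-1) 0 = xs.getD q 0 := by
        show (x :: xs).getD (q+1) 0 = xs.getD q 0
        rw [List.getD_cons_succ]
      set t := xs.getD q 0 with htdef
      have htq : t = xs[q]'hqlt := by
        rw [htdef, List.getD_eq_getElem?_getD, List.getElem?_eq_getElem hqlt, Option.getD_some]
      rw [hgd, pvF,
          show ((x :: xs).take (q+2)).sum = x + (xs.take (q+1)).sum from by
            rw [List.take_succ_cons, List.sum_cons]]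
      have hterm2 : pvF xs (((q+2 : Nat) : Int) - 1) (x + (xs.take (q+1)).sum - x)
          = (Nat.choose (List.count t xs) (List.count t (xs.take (q+1))) : Int) := by
        rw [show ((q+2 : Nat) : Int) - 1 = ((q+1 : Nat) : Int) from by push_cast; ring,
            show x + (xs.take (q+1)).sum - x = (xs.take (q+1)).sum from by ring]
        have h := ih (q+1) hxs (by omega) hpl'
        rw [show q+1-1 = q from by omega] at h
        exact h
      have finish0 :
          (∀ i (h1 : q+1 ≤ i) (h2 : i < xs.length), xs[i]'h2 ≠ x) →
          pvF xs ((q+2:Nat):Int) (x + (xs.take (q+1)).sum) = 0 →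
          pvF xs ((q+2:Nat):Int) (x + (xs.take (q+1)).sum)
            + pvF xs (((q+2:Nat):Int) - 1) (x + (xs.take (q+1)).sum - x)
            = (Nat.choose (List.count t (x :: xs)) (List.count t ((x :: xs).take (q+2))) : Int) := by
        intro hne h0
        rw [h0, zero_add, hterm2, List.take_succ_cons, List.count_cons, List.count_cons]
        by_cases hxt : x = t
        · have hall : ∀ i (h : i < q+1), xs[i]'(by omega) = x := by
            intro i hi
            have hle1 : xs[i]'(by omega) ≤ x := hx _ (List.getElem_mem (by omega))
            have hle2 : xs[q]'hqlt ≤ xs[i]'(by omega) :=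
              pvPairwise_getElem_le xs hxs i q (by omega) hqlt
            have hxq : xs[q]'hqlt = x := by rw [← htq, ← hxt]
            omega
          have hct : List.count t (xs.take (q+1)) = q+1 :=
            pvCount_take_all xs t (q+1) hpl' (fun i h => by rw [hall i h, hxt])
          have hcf : List.count t xs = q+1 := by
            conv_lhs => rw [← List.take_append_drop (q+1) xs]
            rw [List.count_append, hct,
                pvCount_drop_zero xs t (q+1) (fun i h1 h2 => by rw [← hxt]; exact hne i h1 h2)]
          have hb : (x == t) = true := beq_iff_eq.mpr hxt
          rw [hb, hct, hcf]
          norm_num [Nat.choose_self]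
        · have hb : (x == t) = false := by simpa using hxt
          rw [hb]
          simp
      rcases Nat.lt_or_ge xs.length (q+2) with hlen | hlen
      · apply finish0
        · intro i h1 h2; exact absurd h2 (by omega)
        · exact pvF_gt_len xs _ _ (by omega)
      · have hq2 : q + 1 < xs.length := by omega
        have hle : xs[q+1]'hq2 ≤ x := hx _ (List.getElem_mem hq2)
        rcases lt_or_eq_of_le hle with hlt | heq
        · apply finish0
          · intro i h1 h2
            have hmono : xs[i]'h2 ≤ xs[q+1]'hq2 := pvPairwise_getElem_le xs hxs (q+1) i h1 h2
            omega
          · apply pvF_sum_bound xs _ _ hxs (by positivity)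
            rw [show ((q+2:Nat):Int).toNat = q+2 from by omega,
                List.sum_take_succ xs (q+1) hq2]
            omega
        · have hall : ∀ i (h : i < q+2), xs[i]'(by omega) = x := by
            intro i hi
            have hle1 : xs[i]'(by omega) ≤ x := hx _ (List.getElem_mem (by omega))
            have hle2 : xs[q+1]'hq2 ≤ xs[i]'(by omega) :=
              pvPairwise_getElem_le xs hxs i (q+1) (by omega) hq2
            omega
          have htx : t = x := by rw [htq]; exact hall q (by omega)
          have hterm1 : pvF xs ((q+2:Nat):Int) (x + (xs.take (q+1)).sum)
              = (Nat.choose (List.count t xs) (List.count t (xs.take (q+2))) : Int) := by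
            rw [show x + (xs.take (q+1)).sum = (xs.take (q+2)).sum from by
                  rw [List.sum_take_succ xs (q+1) hq2, heq]; ring]
            have h := ih (q+2) hxs (by omega) (by omega)
            rw [show q+2-1 = q+1 from by omega] at h
            have hg2 : xs.getD (q+1) 0 = t := by
              rw [List.getD_eq_getElem?_getD, List.getElem?_eq_getElem hq2, Option.getD_some,
                  heq, htx]
            rw [hg2] at h
            exact h
          rw [hterm1, hterm2]
          have hct1 : List.count t (xs.take (q+1)) = q+1 :=
            pvCount_take_all xs t (q+1) (by omega) (fun i h => by rw [hall i (by omega), htx])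
          have hct2 : List.count t (xs.take (q+2)) = q+2 :=
            pvCount_take_all xs t (q+2) (by omega) (fun i h => by rw [hall i (by omega), htx])
          have hb : (x == t) = true := beq_iff_eq.mpr htx.symm
          rw [hct1, hct2, List.take_succ_cons, List.count_cons, List.count_cons, hb, hct1]
          simp only [if_true]
          have hpas := Nat.choose_succ_succ (List.count t xs + 1 - 1) (q+1)
          rw [show List.count t xs + 1 - 1 = List.count t xs from by omega] at hpas
          push_cast [show List.count t xs + 1 = List.count t xs + 1 from rfl, hpas]
          ring

theorem possible_players_eq_pvF (scores : List Int) (players : Int) :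
    possible_players scores players
      = pvF (PySem.List.sorted scores (fun y => y) true) players
          ((PySem.List.slice (PySem.List.sorted scores (fun y => y) true) none (some players)).sum) := by
  simp only [possible_players]
  rw [PySem.List.foldl_ite_add_one, zero_add,
      List.countP_congr (fun m _ => by rw [pvAr_eq_pvSel]),
      countP_sel_eq_pvF]

theorem pvChoose_eq_choose (C : Nat) : ∀ K : Nat, K ≤ C →
    pvChoose (C : Int) (K : Int) = (Nat.choose C K : Int) := by
  intro K
  induction K with
  | zero => intro _; rw [pvChoose]; simp [PySem.List.pyRange_zero_nat]
  | succ k ih =>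
    intro hK
    have hk : k ≤ C := by omega
    have ih' := ih hk
    rw [pvChoose] at ih' ⊢
    rw [PySem.List.pyRange_zero_nat] at ih' ⊢
    rw [List.range_succ, List.map_append, List.foldl_append, ih']
    simp only [List.map_cons, List.map_nil, List.foldl_cons, List.foldl_nil]
    rw [show (C : Int) - (k : Nat) = ((C - k : Nat) : Int) from by
          push_cast [Nat.cast_sub hk]; ring,
        show ((C.choose k : Nat) : Int) * ((C - k : Nat) : Int) = ((C.choose k * (C - k) : Nat) : Int) from by
          push_cast; ring,
        ← Nat.choose_succ_right_eq,
        show ((C.choose (k+1) * (k+1) : Nat) : Int)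
            = ((C.choose (k+1) : Nat) : Int) * (((k : Nat) : Int) + 1) from by push_cast; ring,
        PySem.Int.floordiv_eq_ediv_of_pos (show (0:Int) < ((k : Nat) : Int) + 1 from by positivity),
        Int.mul_ediv_cancel _ (show (((k : Nat) : Int) + 1) ≠ 0 from by positivity)]

-- ===== VERDICT (by name: the statement is the Claim_ definition above) =====
theorem possible_players_spec : Claim_equal_possible_players := by
  unfold Claim_equal_possible_players
  intro scores players _
  unfold Spec_possible_players
  rw [possible_players_eq_pvF]
  simp only [possible_players_alt]
  set s := PySem.List.sorted scores (fun y => y) true with hsdef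
  by_cases h1 : players < 0
  · rw [pvF_neg s players _ h1, if_pos (Or.inl (by omega)), if_neg (by omega)]
  · by_cases h2 : players = 0
    · subst h2
      rw [PySem.List.slice_to s (by omega)]
      simp only [Int.toNat_zero, List.take_zero, List.sum_nil]
      rw [pvF_zero]
      simp
    · by_cases h3 : (s.length : Int) < players
      · rw [pvF_gt_len s players _ h3, if_pos (Or.inr h3), if_neg h2]
      · have hsort : s.Pairwise (· ≥ ·) := PySem.List.sorted_pairwise_rev scores (fun y => y)
        rw [PySem.List.slice_to s (by omega : (0:Int) ≤ players),
            if_neg (by omega : ¬(players ≤ 0 ∨ (s.length : Int) < players))]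
        set p : Nat := players.toNat with hpdef
        have hpcast : (p : Int) = players := Int.toNat_of_nonneg (by omega)
        have hp1 : 1 ≤ p := by omega
        have hpl : p ≤ s.length := by omega
        rw [show players = (p : Int) from hpcast.symm]
        rw [pvF_main s p hsort hp1 hpl]
        have hpg : PySem.List.pyGetD s ((p : Int) - 1) 0 = s.getD (p-1) 0 := by
          rw [show (p : Int) - 1 = ((p-1 : Nat) : Int) from by omega, PySem.List.pyGetD_natCast]
        rw [hpg, PySem.List.count_eq, PySem.List.count_eq]
        have hKC : List.count (s.getD (p-1) 0) (s.take p) ≤ List.count (s.getD (p-1) 0) s :=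
          (List.take_sublist p s).count_le _
        rw [pvChoose_eq_choose _ _ hKC]
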